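-- pv_equiv track=rewrite | github.com/jschnab/leetcode | arrays/allocate_candies.py | allocate_candies
-- ===== SOURCE A (Python) =====
-- def allocate_candies(A, k):
--     """
--     Given a pile of candies of size s, it's easy to calculate how many
--     children we could feed (lines 32-34). We could start from the
--     maximum number of children we could ever feed (ignoring piles) and
--     iteratively calculate how many children we can feed by splitting
--     piles, decrementing the number of children by one if we cannot feed them
--     all else return the first valid value.
--
--     We can improve the time performance by using a binary search instead of
--     a linear search.
--
--     Time complexity: O(len(A) * lg(N)) with N the total number of candies.
--     Space complexity: O(1).
--     """
--     lo = 0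
--
--     # the maximum number of candies we could theoretically allocate
--     # to each children (if we ignored piles)
--     hi = sum(A) // k
--
--     while lo < hi:
--         mid = (lo + hi + 1) // 2
--
--         # n is the maximum number of children that can get a pile of candies
--         # of size mid
--         n = 0
--         for pile in A:
--             n += pile // mid
--
--         # if we can feed more children than expected, we could give less
--         # more candies to each children
--         if n >= k:
--             lo = mid
--
--         # we are trying to give too many candies per children
--         else:
--             hi = mid - 1
--
--     return lo
-- ===== SOURCE B (Python) =====
-- def allocate_candies(A, k):
--     # Linear search: scan candidate per-child amounts from the theoretical
--     # maximum downwards and return the first feasible one (0 if none).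
--     hi = sum(A) // k
--     m = hi
--     while m > 0:
--         if sum(p // m for p in A) >= k:
--             return m
--         m -= 1
--     return 0
-- ===== Notes on version B (the rewrite author's own statement) =====
-- stated objective: simpler
-- what changed: Replaced the lo/hi binary search by the plain linear scan the docstring describes: try each per-child amount from sum(A)//k downwards and return the first feasible one.
-- outside the precondition, e.g. on allocate_candies([5], 0): A raises ZeroDivisionError, B raises ZeroDivisionError; on allocate_candies([-18, 36, 32, -18, 35], 2): A returns 16, B returns 18
import Mathlib
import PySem

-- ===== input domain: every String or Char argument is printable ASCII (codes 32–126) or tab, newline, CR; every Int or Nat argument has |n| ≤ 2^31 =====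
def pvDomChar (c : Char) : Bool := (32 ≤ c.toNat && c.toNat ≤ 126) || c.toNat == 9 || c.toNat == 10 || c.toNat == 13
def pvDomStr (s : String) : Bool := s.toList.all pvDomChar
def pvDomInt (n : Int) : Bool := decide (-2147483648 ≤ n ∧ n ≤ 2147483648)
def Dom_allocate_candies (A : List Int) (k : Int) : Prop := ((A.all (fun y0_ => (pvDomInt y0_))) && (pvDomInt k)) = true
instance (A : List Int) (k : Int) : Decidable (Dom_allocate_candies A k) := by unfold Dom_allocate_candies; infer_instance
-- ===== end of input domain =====

-- B replaces A's lo/hi binary search by the plain downward linear scan the docstring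
-- describes (first feasible per-child amount from sum(A)//k down); simpler, not faster.


-- ===== PORT A =====
-- midpoint bounds, cited by acLoopA's decreasing_by
theorem pvMidBounds {lo hi : Int} (h : lo < hi) :
    lo < PySem.Int.floordiv (lo + hi + 1) 2 ∧ PySem.Int.floordiv (lo + hi + 1) 2 ≤ hi := by
  constructor
  · have h1 : (lo + 1) * 2 ≤ lo + hi + 1 := by linarith
    have h2 := (PySem.Int.le_floordiv_iff_mul_le (a := lo + hi + 1) (b := 2) (q := lo + 1)
      (by norm_num)).mpr h1
    omega
  · have h1 : lo + hi + 1 < (hi + 1) * 2 := by linarith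
    have h2 := (PySem.Int.floordiv_lt_iff_lt_mul (a := lo + hi + 1) (b := 2) (q := hi + 1)
      (by norm_num)).mpr h1
    omega

-- the while-loop of A (binary search on [lo, hi])
def acLoopA (A : List Int) (k lo hi : Int) : Int :=
  if h : lo < hi then
    let mid := PySem.Int.floordiv (lo + hi + 1) 2
    let n := A.foldl (fun n pile => n + PySem.Int.floordiv pile mid) 0
    if k ≤ n then acLoopA A k mid hi else acLoopA A k lo (mid - 1)
  else lo
termination_by (hi - lo).toNat
decreasing_by
  · have := pvMidBounds h; omega
  · have := pvMidBounds h; omega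

def allocate_candies (A : List Int) (k : Int) : Int :=
  acLoopA A k 0 (PySem.Int.floordiv A.sum k)

-- ===== PORT B =====
-- the while-loop of B: downward linear scan, first feasible m wins, 0 if none
def acLoopB (A : List Int) (k m : Int) : Int :=
  if 0 < m then
    if k ≤ (A.map (fun p => PySem.Int.floordiv p m)).sum then m
    else acLoopB A k (m - 1)
  else 0
termination_by m.toNat
decreasing_by omega

def allocate_candies_alt (A : List Int) (k : Int) : Int :=
  acLoopB A k (PySem.Int.floordiv A.sum k)

-- ===== PRECONDITION & SPEC =====
-- Pre_ excludes k = 0, on which A raises ZeroDivisionError, and lists with a negative pile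
-- whose total still allows a positive per-child amount (sum(A)//k ≥ 1): negative candy piles
-- are outside the task's natural domain, the per-child count is not monotone there, and A's
-- binary search then returns an accidental value as defensible as B's linear-scan one (when
-- sum(A)//k ≤ 0 both trivially return 0, so those inputs stay inside the claim).
def Pre_allocate_candies (A : List Int) (k : Int) : Prop :=
  k ≠ 0 ∧ ((∀ x ∈ A, 0 ≤ x) ∨ PySem.Int.floordiv A.sum k ≤ 0)
instance (A : List Int) (k : Int) : Decidable (Pre_allocate_candies A k) := by
  unfold Pre_allocate_candies; infer_instance

def pvWitness_allocate_candies : List Int × Int := ([5, 8, 6], 3)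

def Spec_allocate_candies (A : List Int) (k : Int) (out : Int) : Prop := out = allocate_candies_alt A k
instance (A : List Int) (k : Int) (out : Int) : Decidable (Spec_allocate_candies A k out) := by
  unfold Spec_allocate_candies; infer_instance

-- ===== CLAIM (what is proved, stated in full; the proofs are below) =====
def Claim_equal_allocate_candies : Prop := ∀ (A : List Int) (k : Int), Dom_allocate_candies A k → Pre_allocate_candies A k → Spec_allocate_candies A k (allocate_candies A k)

-- ===== LEMMAS AND PROOFS =====

-- the number of children that can each get m candies (the quantity both loops test against k)
def pvN (A : List Int) (m : Int) : Int := (A.map (fun p => PySem.Int.floordiv p m)).sum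

-- characterisation both loops are proved to satisfy: the result is 0 or feasible, and
-- nothing larger is feasible
def pvP (A : List Int) (k x : Int) : Prop :=
  (x = 0 ∨ (1 ≤ x ∧ k ≤ pvN A x)) ∧ 0 ≤ x ∧ ∀ j, x < j → ¬ k ≤ pvN A j

theorem pvP_unique {A : List Int} {k x y : Int} (hx : pvP A k x) (hy : pvP A k y) : x = y := by
  obtain ⟨hx1, hx0, hxup⟩ := hx
  obtain ⟨hy1, hy0, hyup⟩ := hy
  by_contra hne
  rcases lt_or_gt_of_ne hne with h | h
  · have := hxup y h
    rcases hy1 with h0 | ⟨_, hf⟩ <;> [omega; exact this hf]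
  · have := hyup x h
    rcases hx1 with h0 | ⟨_, hf⟩ <;> [omega; exact this hf]

theorem pv_floordiv_nonpos {a b : Int} (ha : 0 ≤ a) (hb : b < 0) :
    PySem.Int.floordiv a b ≤ 0 := by
  have h1 := PySem.Int.floordiv_mul_add_mod a b
  have h2 := PySem.Int.mod_neg_bounds (a := a) hb
  by_contra h
  have h' : 0 < PySem.Int.floordiv a b := by omega
  nlinarith

-- pointwise antitonicity of p // m in m, for a nonnegative pile
theorem pv_floordiv_anti {p m₁ m₂ : Int} (hp : 0 ≤ p) (h1 : 0 < m₁) (h12 : m₁ ≤ m₂) :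
    PySem.Int.floordiv p m₂ ≤ PySem.Int.floordiv p m₁ := by
  have h2 : (0 : Int) < m₂ := lt_of_lt_of_le h1 h12
  rw [PySem.Int.floordiv_eq_ediv_of_pos h1, PySem.Int.floordiv_eq_ediv_of_pos h2]
  have hq : 0 ≤ p / m₂ := Int.ediv_nonneg hp (le_of_lt h2)
  rw [Int.le_ediv_iff_mul_le h1]
  calc p / m₂ * m₁ ≤ p / m₂ * m₂ := by nlinarith
    _ ≤ p := Int.ediv_mul_le p (by omega)

theorem pvN_anti {A : List Int} (hA : ∀ x ∈ A, 0 ≤ x) {m₁ m₂ : Int}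
    (h1 : 0 < m₁) (h12 : m₁ ≤ m₂) : pvN A m₂ ≤ pvN A m₁ :=
  List.sum_le_sum (fun p hp => pv_floordiv_anti (hA p hp) h1 h12)

-- sum of floors is at most the floor of the sum
theorem pv_sumdiv_le {j : Int} (hj : 0 < j) :
    ∀ (A : List Int), (∀ x ∈ A, 0 ≤ x) → pvN A j ≤ A.sum / j := by
  intro A
  induction A with
  | nil => intro _; simp [pvN]
  | cons p t ih =>
    intro hA
    have hp : 0 ≤ p := hA p (List.mem_cons_self ..)
    have ht := ih (fun x hx => hA x (List.mem_cons_of_mem _ hx))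
    have hstep : p / j + t.sum / j ≤ (p + t.sum) / j := by
      rw [Int.le_ediv_iff_mul_le hj, add_mul]
      have e1 := Int.ediv_mul_le p (show j ≠ 0 by omega)
      have e2 := Int.ediv_mul_le t.sum (show j ≠ 0 by omega)
      omega
    have : pvN (p :: t) j = PySem.Int.floordiv p j + pvN t j := by simp [pvN]
    rw [this, List.sum_cons, PySem.Int.floordiv_eq_ediv_of_pos hj]
    omega

-- nothing above sum(A) // k is feasible (k positive, piles nonnegative)
theorem pv_above_hi_infeasible {A : List Int} {k j : Int} (hk : 0 < k)
    (hA : ∀ x ∈ A, 0 ≤ x) (hj : PySem.Int.floordiv A.sum k < j) : ¬ k ≤ pvN A j := by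
  intro hfeas
  set hi0 := PySem.Int.floordiv A.sum k with hhi0
  have hs : 0 ≤ A.sum := List.sum_nonneg hA
  have hhi0n : 0 ≤ hi0 := by
    rw [hhi0, PySem.Int.floordiv_eq_ediv_of_pos hk]; exact Int.ediv_nonneg hs (le_of_lt hk)
  have hjpos : 0 < j := by omega
  have hb : hi0 * k ≤ A.sum ∧ A.sum < (hi0 + 1) * k :=
    (PySem.Int.floordiv_eq_iff_of_pos hk).mp rfl
  have h1 : pvN A j ≤ A.sum / j := pv_sumdiv_le hjpos A hA
  have h2 : A.sum / j < k := by
    rw [Int.ediv_lt_iff_lt_mul hjpos]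
    calc A.sum < (hi0 + 1) * k := hb.2
      _ ≤ k * j := by nlinarith
  omega

-- the binary-search loop satisfies pvP, given its invariant
theorem pvA_char {A : List Int} {k : Int} (hA : ∀ x ∈ A, 0 ≤ x) :
    ∀ (n : Nat) (lo hi : Int), (hi - lo).toNat ≤ n → 0 ≤ lo → lo ≤ hi →
    (lo = 0 ∨ (1 ≤ lo ∧ k ≤ pvN A lo)) → (∀ j, hi < j → ¬ k ≤ pvN A j) →
    pvP A k (acLoopA A k lo hi) := by
  intro n
  induction n with
  | zero =>
    intro lo hi hfuel h0 hlh hf hup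
    have : ¬ lo < hi := by omega
    rw [acLoopA, dif_neg this]
    exact ⟨hf, h0, fun j hj => hup j (by omega)⟩
  | succ n ih =>
    intro lo hi hfuel h0 hlh hf hup
    by_cases hlt : lo < hi
    · obtain ⟨hm1, hm2⟩ := pvMidBounds hlt
      set mid := PySem.Int.floordiv (lo + hi + 1) 2 with hmid
      have hfold : A.foldl (fun n pile => n + PySem.Int.floordiv pile mid) 0 = pvN A mid := by
        rw [PySem.List.foldl_add A (fun pile => PySem.Int.floordiv pile mid) 0]; simp [pvN]
      rw [acLoopA, dif_pos hlt]
      simp only [← hmid, hfold]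
      by_cases hfeas : k ≤ pvN A mid
      · rw [if_pos hfeas]
        exact ih mid hi (by omega) (by omega) (by omega) (Or.inr ⟨by omega, hfeas⟩) hup
      · rw [if_neg hfeas]
        refine ih lo (mid - 1) (by omega) h0 (by omega) hf ?_
        intro j hj hfj
        exact hfeas (le_trans hfj (pvN_anti hA (by omega) (by omega)))
    · rw [acLoopA, dif_neg hlt]
      exact ⟨hf, h0, fun j hj => hup j (by omega)⟩

-- the downward linear scan satisfies pvP, given its invariant
theorem pvB_char {A : List Int} {k : Int} :
    ∀ (n : Nat) (m : Int), m.toNat ≤ n → 0 ≤ m →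
    (∀ j, m < j → ¬ k ≤ pvN A j) →
    pvP A k (acLoopB A k m) := by
  intro n
  induction n with
  | zero =>
    intro m hfuel h0 hup
    have hm : m = 0 := by omega
    rw [acLoopB, if_neg (by omega : ¬ (0:Int) < m)]
    exact ⟨Or.inl rfl, le_refl _, fun j hj => hup j (by omega)⟩
  | succ n ih =>
    intro m hfuel h0 hup
    by_cases hm : 0 < m
    · rw [acLoopB, if_pos hm]
      by_cases hfeas : k ≤ (A.map (fun p => PySem.Int.floordiv p m)).sum
      · rw [if_pos hfeas]
        exact ⟨Or.inr ⟨by omega, hfeas⟩, by omega, hup⟩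
      · rw [if_neg hfeas]
        refine ih (m - 1) (by omega) (by omega) ?_
        intro j hj hfj
        rcases eq_or_lt_of_le (show m ≤ j by omega) with rfl | hlt
        · exact hfeas hfj
        · exact hup j hlt hfj
    · rw [acLoopB, if_neg hm]
      have hm0 : m = 0 := by omega
      exact ⟨Or.inl rfl, le_refl _, fun j hj => hup j (by omega)⟩

-- ===== VERDICT (by name: the statement is the Claim_ definition above) =====
theorem allocate_candies_spec : Claim_equal_allocate_candies := by
  intro A k _hDom hPre
  obtain ⟨hk0, hPre2⟩ := hPre
  unfold Spec_allocate_candies allocate_candies allocate_candies_alt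
  set hi0 := PySem.Int.floordiv A.sum k with hhi0
  by_cases hpos : 0 < hi0
  · -- here all piles are nonnegative, and k must be positive
    have hA : ∀ x ∈ A, 0 ≤ x := by
      rcases hPre2 with h | h
      · exact h
      · omega
    have hs : 0 ≤ A.sum := List.sum_nonneg hA
    have hk : 0 < k := by
      rcases lt_or_gt_of_ne hk0 with h | h
      · have := pv_floordiv_nonpos hs h; omega
      · exact h
    have hup : ∀ j, hi0 < j → ¬ k ≤ pvN A j := fun j hj =>
      pv_above_hi_infeasible hk hA (by rw [← hhi0]; omega)
    have hAside : pvP A k (acLoopA A k 0 hi0) :=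
      pvA_char hA (hi0 - 0).toNat 0 hi0 (le_refl _) (le_refl _) (by omega) (Or.inl rfl) hup
    have hBside : pvP A k (acLoopB A k hi0) :=
      pvB_char hi0.toNat hi0 (le_refl _) (by omega) hup
    exact pvP_unique hAside hBside
  · rw [acLoopA, dif_neg (by omega : ¬ (0:Int) < hi0),
        acLoopB, if_neg (by omega : ¬ (0:Int) < hi0)]
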